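-- pv_equiv track=rewrite | github.com/TonyDumarcher/NSI-Lessons | Python/Stacked Lists/Liste pilée/mes_piles.py | inverse_pile_sans_modif
-- ===== SOURCE A (Python) =====
-- def creer_pile(c):
--     p = (c + 1) * [None]
--     p[0] = 0
--     return p
--
-- def empiler(p, x):
--     if p[0] < len(p) - 1:
--         p[0] += 1
--         p[p[0]] = x
--     return p
--
-- def depiler(p):
--     if not pile_vide(p):
--         val = p[p[0]]
--         p[p[0]] = None
--         p[0] -= 1
--         return val
--     return None
--
-- def pile_vide(p):
--     return p[0] == 0
--
-- def inverse_pile(p):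
--     pile_inverse = creer_pile(len(p) - 1)
--     while not pile_vide(p):
--         element = depiler(p)
--         empiler(pile_inverse, element)
--     return pile_inverse
--
-- def inverse_pile_sans_modif(p):
--     p_inv = creer_pile(len(p) - 1)
--     p_temp = creer_pile(len(p) - 1)
--     while not pile_vide(p):
--         empiler(p_temp, depiler(p))
--     while not pile_vide(p_temp):
--         element = depiler(p_temp)
--         empiler(p, element)
--         empiler(p_inv, element)
--     return inverse_pile(p_inv)
-- ===== SOURCE B (Python) =====
-- def inverse_pile_sans_modif(p):
--     n = p[0]
--     return [n] + [p[i] for i in range(n, 0, -1)] + [None] * (len(p) - 1 - n)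
-- ===== Notes on version B (the rewrite author's own statement) =====
-- stated objective: simpler
-- what changed: B reads the top index n stored in the first cell once and builds the result directly in one comprehension over the indices n..1 plus None padding, replacing A's three pop/push while-loops through two auxiliary stacks and the final inverse_pile pass; B never mutates p (A temporarily empties p, pushes everything back, and blanks the garbage slots above the top).
import Mathlib
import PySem

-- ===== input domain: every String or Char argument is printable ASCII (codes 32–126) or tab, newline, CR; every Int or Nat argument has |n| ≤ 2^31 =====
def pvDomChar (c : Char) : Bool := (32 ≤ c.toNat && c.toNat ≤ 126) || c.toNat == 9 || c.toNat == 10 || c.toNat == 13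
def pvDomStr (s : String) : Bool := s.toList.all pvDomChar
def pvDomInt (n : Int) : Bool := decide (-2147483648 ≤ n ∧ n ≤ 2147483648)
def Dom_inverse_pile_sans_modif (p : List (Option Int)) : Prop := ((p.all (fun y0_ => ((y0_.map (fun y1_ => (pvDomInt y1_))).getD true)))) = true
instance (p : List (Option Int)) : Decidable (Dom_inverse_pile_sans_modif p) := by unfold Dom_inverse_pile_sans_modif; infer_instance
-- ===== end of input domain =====

-- B replaces A's three pop/push loops over two auxiliary stacks by one direct slice-reverse-pad
-- construction (objective: simpler).  Equivalence is about the RETURN value only: the Python A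
-- temporarily pops p empty and pushes everything back (blanking garbage slots above the top),
-- which a caller could observe; B never mutates p.

-- B builds the reversed stack directly by slicing and reversing the live segment, instead of A's
-- three pop/push loops through two auxiliary stacks (objective: simpler).  Equivalence is about the
-- RETURN value only: the Python A temporarily pops p empty and pushes everything back (blanking
-- garbage slots above the top), which a caller could observe; B never mutates p.

-- ===== PORT A =====
-- a stack is the Python list [top_index, slot1, ..., slotC]; index writes use .toNat, exact for the
-- in-range indices that occur under Pre_'s stack invariant (outside Pre_ the Python raises).
def creer_pile (c : Int) : List (Option Int) :=
  let p := List.replicate (c + 1).toNat (none : Option Int)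
  p.set 0 (some 0)
def pile_vide (p : List (Option Int)) : Bool :=
  p.head?.getD none == some 0
def empiler (p : List (Option Int)) (x : Option Int) : List (Option Int) :=
  match p.head?.getD none with
  | some k =>
      if k < (p.length : Int) - 1 then
        ((p.set 0 (some (k + 1))).set (k + 1).toNat x)
      else p
  | none => p
def depiler (p : List (Option Int)) : Option Int × List (Option Int) :=
  if pile_vide p then (none, p)
  else
    match p.head?.getD none with
    | some k => ((PySem.List.pyGet? p k).getD none, (p.set k.toNat none).set 0 (some (k - 1)))
    | none => (none, p)
def boucle1 (fuel : Nat) (p t : List (Option Int)) : List (Option Int) × List (Option Int) :=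
  match fuel with
  | 0 => (p, t)
  | f + 1 =>
      if pile_vide p then (p, t)
      else
        let (v, p') := depiler p
        boucle1 f p' (empiler t v)
def boucle2 (fuel : Nat) (t p pinv : List (Option Int)) :
    List (Option Int) × List (Option Int) × List (Option Int) :=
  match fuel with
  | 0 => (t, p, pinv)
  | f + 1 =>
      if pile_vide t then (t, p, pinv)
      else
        let (e, t') := depiler t
        boucle2 f t' (empiler p e) (empiler pinv e)
def boucle3 (fuel : Nat) (p r : List (Option Int)) : List (Option Int) :=
  match fuel with
  | 0 => r
  | f + 1 =>
      if pile_vide p then r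
      else
        let (e, p') := depiler p
        boucle3 f p' (empiler r e)
def inverse_pile (p : List (Option Int)) : List (Option Int) :=
  boucle3 p.length p (creer_pile ((p.length : Int) - 1))
def inverse_pile_sans_modif (p : List (Option Int)) : List (Option Int) :=
  let p_inv := creer_pile ((p.length : Int) - 1)
  let p_temp := creer_pile ((p.length : Int) - 1)
  let r1 := boucle1 p.length p p_temp
  let r2 := boucle2 p.length r1.2 r1.1 p_inv
  inverse_pile r2.2.2

-- ===== PORT B =====
def inverse_pile_sans_modif_alt (p : List (Option Int)) : List (Option Int) :=
  match p.head?.getD none with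
  | some n =>
      some n :: ((PySem.List.pyRange n 0 (-1)).map (fun i => (PySem.List.pyGet? p i).getD none))
        ++ List.replicate ((p.length : Int) - 1 - n).toNat (none : Option Int)
  | none => []   -- Python B raises here (empty list -> IndexError, first cell None -> TypeError); outside Pre_

-- ===== PRECONDITION & SPEC =====
-- Pre_ is the stack invariant: p nonempty, its first cell an integer k with 0 <= k <= len(p)-1.
-- On every input outside it the Python A raises (IndexError or TypeError), so no input on which A returns is excluded.
def Pre_inverse_pile_sans_modif (p : List (Option Int)) : Prop :=
  p.head?.getD none ≠ none ∧ 0 ≤ (p.head?.getD none).getD 0 ∧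
    (p.head?.getD none).getD 0 ≤ (p.length : Int) - 1
instance (p : List (Option Int)) : Decidable (Pre_inverse_pile_sans_modif p) := by
  unfold Pre_inverse_pile_sans_modif; infer_instance
def pvWitness_inverse_pile_sans_modif : List (Option Int) := [some 2, some 10, some 20, none]

def Spec_inverse_pile_sans_modif (p : List (Option Int)) (out : List (Option Int)) : Prop :=
  out = inverse_pile_sans_modif_alt p
instance (p : List (Option Int)) (out : List (Option Int)) : Decidable (Spec_inverse_pile_sans_modif p out) := by
  unfold Spec_inverse_pile_sans_modif; infer_instance

-- ===== CLAIM (what is proved, stated in full; the proofs are below) =====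
def Claim_equal_inverse_pile_sans_modif : Prop :=
  ∀ (p : List (Option Int)), Dom_inverse_pile_sans_modif p → Pre_inverse_pile_sans_modif p →
    Spec_inverse_pile_sans_modif p (inverse_pile_sans_modif p)

-- ===== LEMMAS AND PROOFS =====
-- a valid stack with (Nat) top index n and slot list l
def stk (n : Nat) (l : List (Option Int)) : List (Option Int) := some (n : Int) :: l

theorem pile_vide_stk (n : Nat) (l : List (Option Int)) :
    pile_vide (stk n l) = (n == 0) := by
  simp [pile_vide, stk]
theorem empiler_stk (j : Nat) (m : List (Option Int)) (x : Option Int) (hj : j < m.length) :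
    empiler (stk j m) x = stk (j + 1) (m.set j x) := by
  simp only [empiler, stk, List.head?, Option.getD_some, List.length_cons]
  rw [if_pos (by push_cast; omega)]
  have h1 : ((j : Int) + 1).toNat = j + 1 := by omega
  rw [h1]
  push_cast
  simp
theorem depiler_stk (n : Nat) (l : List (Option Int)) (hn : n < l.length) :
    depiler (stk (n + 1) l) = (l[n]?.getD none, stk n (l.set n none)) := by
  simp only [depiler, stk, pile_vide, List.head?, Option.getD_some]
  rw [if_neg (by simp; omega)]
  push_cast
  have h1 : ((n : Int) + 1).toNat = n + 1 := by omega
  have h2 : ((n : Int) + 1) - 1 = (n : Int) := by ring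
  rw [h1, h2]
  simp [PySem.List.pyGet?, PySem.List.pyIdx?]
  rw [if_pos (by omega : (0:Int) ≤ (n:Int)+1), if_pos hn]
  rfl
theorem boucle1_snd (n : Nat) : ∀ (f : Nat) (l pre suf : List (Option Int)),
    n ≤ l.length → n ≤ suf.length → n ≤ f →
    (boucle1 f (stk n l) (stk pre.length (pre ++ suf))).2
      = stk (pre.length + n) (pre ++ (l.take n).reverse ++ suf.drop n) := by
  induction n with
  | zero =>
      intro f l pre suf _ _ _
      cases f with
      | zero => simp [boucle1]
      | succ f => simp [boucle1, pile_vide_stk]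
  | succ n ih =>
      intro f l pre suf hl hs hf
      cases f with
      | zero => omega
      | succ f =>
        have hn : n < l.length := by omega
        have hsuf : suf ≠ [] := by intro h; subst h; simp at hs
        obtain ⟨s0, srest, rfl⟩ := List.exists_cons_of_ne_nil hsuf
        rw [boucle1, if_neg (by rw [pile_vide_stk]; simp)]
        rw [depiler_stk n l hn]
        have hlen : pre.length < (pre ++ s0 :: srest).length := by simp
        simp only []
        rw [empiler_stk pre.length (pre ++ s0 :: srest) _ hlen]
        have hset : (pre ++ s0 :: srest).set pre.length (l[n]?.getD none)
            = (pre ++ [l[n]?.getD none]) ++ srest := by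
          rw [List.set_append_right _ _ (le_refl _)]
          simp
        rw [hset]
        rw [show pre.length + 1 = (pre ++ [l[n]?.getD none]).length by simp]
        rw [ih f (l.set n none) (pre ++ [l[n]?.getD none]) srest
              (by simp; omega) (by simp at hs ⊢; omega) (by omega)]
        have htk : (l.set n none).take n = l.take n := by
          apply List.ext_getElem
          · simp
          · intro i h1 h2
            rw [List.getElem_take, List.getElem_take, List.getElem_set_ne (by simp at h1; omega)]
        have htk2 : l.take (n + 1) = l.take n ++ [l[n]] := List.take_succ_eq_append_getElem hn
        have hget : l[n]?.getD none = l[n] := by simp [List.getElem?_eq_getElem hn]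
        rw [htk, htk2, hget]
        simp [stk]
        constructor
        · omega
        · rw [htk2, List.reverse_append]
          simp
theorem boucle2_third (n : Nat) : ∀ (f : Nat) (m P pre suf : List (Option Int)),
    n ≤ m.length → n ≤ suf.length → n ≤ f →
    (boucle2 f (stk n m) P (stk pre.length (pre ++ suf))).2.2
      = stk (pre.length + n) (pre ++ (m.take n).reverse ++ suf.drop n) := by
  induction n with
  | zero =>
      intro f m P pre suf _ _ _
      cases f with
      | zero => simp [boucle2]
      | succ f => simp [boucle2, pile_vide_stk]
  | succ n ih =>
      intro f m P pre suf hm hs hf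
      cases f with
      | zero => omega
      | succ f =>
        have hn : n < m.length := by omega
        have hsuf : suf ≠ [] := by intro h; subst h; simp at hs
        obtain ⟨s0, srest, rfl⟩ := List.exists_cons_of_ne_nil hsuf
        rw [boucle2, if_neg (by rw [pile_vide_stk]; simp)]
        rw [depiler_stk n m hn]
        have hlen : pre.length < (pre ++ s0 :: srest).length := by simp
        simp only []
        rw [empiler_stk pre.length (pre ++ s0 :: srest) _ hlen]
        have hset : (pre ++ s0 :: srest).set pre.length (m[n]?.getD none)
            = (pre ++ [m[n]?.getD none]) ++ srest := by
          rw [List.set_append_right _ _ (le_refl _)]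
          simp
        rw [hset]
        rw [show pre.length + 1 = (pre ++ [m[n]?.getD none]).length by simp]
        rw [ih f (m.set n none) _ (pre ++ [m[n]?.getD none]) srest
              (by simp; omega) (by simp at hs ⊢; omega) (by omega)]
        have htk : (m.set n none).take n = m.take n := by
          apply List.ext_getElem
          · simp
          · intro i h1 h2
            rw [List.getElem_take, List.getElem_take, List.getElem_set_ne (by simp at h1; omega)]
        have htk2 : m.take (n + 1) = m.take n ++ [m[n]] := List.take_succ_eq_append_getElem hn
        have hget : m[n]?.getD none = m[n] := by simp [List.getElem?_eq_getElem hn]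
        rw [htk, htk2, hget]
        simp [stk]
        constructor
        · omega
        · rw [htk2, List.reverse_append]
          simp
theorem boucle3_char (n : Nat) : ∀ (f : Nat) (cl pre suf : List (Option Int)),
    n ≤ cl.length → n ≤ suf.length → n ≤ f →
    boucle3 f (stk n cl) (stk pre.length (pre ++ suf))
      = stk (pre.length + n) (pre ++ (cl.take n).reverse ++ suf.drop n) := by
  induction n with
  | zero =>
      intro f cl pre suf _ _ _
      cases f with
      | zero => simp [boucle3]
      | succ f => simp [boucle3, pile_vide_stk]
  | succ n ih =>
      intro f cl pre suf hc hs hf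
      cases f with
      | zero => omega
      | succ f =>
        have hn : n < cl.length := by omega
        have hsuf : suf ≠ [] := by intro h; subst h; simp at hs
        obtain ⟨s0, srest, rfl⟩ := List.exists_cons_of_ne_nil hsuf
        rw [boucle3, if_neg (by rw [pile_vide_stk]; simp)]
        rw [depiler_stk n cl hn]
        have hlen : pre.length < (pre ++ s0 :: srest).length := by simp
        simp only []
        rw [empiler_stk pre.length (pre ++ s0 :: srest) _ hlen]
        have hset : (pre ++ s0 :: srest).set pre.length (cl[n]?.getD none)
            = (pre ++ [cl[n]?.getD none]) ++ srest := by
          rw [List.set_append_right _ _ (le_refl _)]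
          simp
        rw [hset]
        rw [show pre.length + 1 = (pre ++ [cl[n]?.getD none]).length by simp]
        rw [ih f (cl.set n none) (pre ++ [cl[n]?.getD none]) srest
              (by simp; omega) (by simp at hs ⊢; omega) (by omega)]
        have htk : (cl.set n none).take n = cl.take n := by
          apply List.ext_getElem
          · simp
          · intro i h1 h2
            rw [List.getElem_take, List.getElem_take, List.getElem_set_ne (by simp at h1; omega)]
        have htk2 : cl.take (n + 1) = cl.take n ++ [cl[n]] := List.take_succ_eq_append_getElem hn
        have hget : cl[n]?.getD none = cl[n] := by simp [List.getElem?_eq_getElem hn]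
        rw [htk, htk2, hget]
        simp [stk]
        constructor
        · omega
        · rw [htk2, List.reverse_append]
          simp
theorem creer_pile_eq (L : Nat) : creer_pile ((L : Int) + 1 - 1) = stk 0 (List.replicate L none) := by
  simp only [creer_pile, stk]
  rw [show ((L : Int) + 1 - 1 + 1).toNat = L + 1 by omega]
  simp [List.replicate_succ]
theorem pyRange_map_rev (nk : Nat) (l : List (Option Int)) (hnkL : nk ≤ l.length) :
    (PySem.List.pyRange (nk : Int) 0 (-1)).map
        (fun i => (PySem.List.pyGet? (some (nk : Int) :: l) i).getD none) = (l.take nk).reverse := by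
  rw [PySem.List.pyRange_neg_one, List.map_map]
  apply List.ext_getElem
  · simp; omega
  · intro j h1 h2
    simp only [List.getElem_map, List.getElem_range, Function.comp_apply]
    have hj : j < nk := by simp at h1; omega
    simp only [PySem.List.pyGet?, PySem.List.pyIdx?]
    rw [if_pos (by omega : (0:Int) ≤ (nk : Int) - (j : Int))]
    rw [if_pos (show ((nk : Int) - (j : Int)) < (((some (nk : Int) :: l)).length : Int) by simp; omega)]
    have ht : ((nk : Int) - (j : Int)).toNat = (nk - j - 1) + 1 := by omega
    rw [ht]
    simp only [Option.bind_some, List.getElem?_cons_succ]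
    rw [List.getElem_reverse, List.getElem_take]
    rw [List.getElem?_eq_getElem (by omega)]
    simp only [Option.getD_some]
    congr 1
    simp only [List.length_take, Nat.min_eq_left hnkL]
    omega

theorem main_eq (nk : Nat) (l : List (Option Int)) (hnkL : nk ≤ l.length) :
    inverse_pile_sans_modif (stk nk l) = inverse_pile_sans_modif_alt (stk nk l) := by
  set L := l.length with hL
  have hplen : (stk nk l).length = L + 1 := by simp [stk]; rw [hL]
  have hplenI : ((stk nk l).length : Int) - 1 = (L : Int) + 1 - 1 := by rw [hplen]; push_cast; ring
  have hcre : creer_pile (((stk nk l).length : Int) - 1) = stk 0 (List.replicate L none) := by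
    rw [hplenI, creer_pile_eq]
  have hfuel : nk ≤ (stk nk l).length := by rw [hplen]; omega
  have hzero : stk 0 (List.replicate L (none : Option Int))
      = stk (List.length ([] : List (Option Int))) ([] ++ List.replicate L none) := by simp
  have h1 : (boucle1 (stk nk l).length (stk nk l) (stk 0 (List.replicate L none))).2
      = stk nk ((l.take nk).reverse ++ List.replicate (L - nk) none) := by
    rw [hzero]
    rw [boucle1_snd nk (stk nk l).length l [] (List.replicate L none) hnkL
          (by simp; omega) hfuel]
    simp [List.drop_replicate]
  set T1 := (l.take nk).reverse ++ List.replicate (L - nk) (none : Option Int) with hT1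
  have hT1len : nk ≤ T1.length := by simp [hT1]; omega
  have htakeT1 : (T1.take nk).reverse = l.take nk := by
    rw [hT1, List.take_append_of_le_length (by simp; omega)]
    rw [List.take_of_length_le (by simp)]
    simp
  have h2 : (boucle2 (stk nk l).length (stk nk T1)
        (boucle1 (stk nk l).length (stk nk l) (stk 0 (List.replicate L none))).1
        (stk 0 (List.replicate L none))).2.2
      = stk nk (l.take nk ++ List.replicate (L - nk) none) := by
    rw [hzero]
    rw [boucle2_third nk (stk nk l).length T1 _ [] (List.replicate L none) hT1len
          (by simp; omega) hfuel]
    simp [List.drop_replicate, htakeT1]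
  have hClen : (stk nk (l.take nk ++ List.replicate (L - nk) (none : Option Int))).length = L + 1 := by
    simp [stk]; omega
  have h3 : inverse_pile (stk nk (l.take nk ++ List.replicate (L - nk) none))
      = stk nk ((l.take nk).reverse ++ List.replicate (L - nk) none) := by
    unfold inverse_pile
    rw [hClen]
    rw [show ((L + 1 : Nat) : Int) - 1 = (L : Int) + 1 - 1 by push_cast; ring, creer_pile_eq]
    rw [hzero]
    rw [boucle3_char nk (L + 1) (l.take nk ++ List.replicate (L - nk) none)
          [] (List.replicate L none) (by simp; omega) (by simp; omega) (by omega)]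
    have htake : (l.take nk ++ List.replicate (L - nk) (none : Option Int)).take nk = l.take nk := by
      rw [List.take_append_of_le_length (by simp; omega)]
      rw [List.take_of_length_le (by simp)]
    simp [List.drop_replicate, htake]
  have hB : inverse_pile_sans_modif_alt (stk nk l)
      = stk nk ((l.take nk).reverse ++ List.replicate (L - nk) none) := by
    show inverse_pile_sans_modif_alt (some (nk : Int) :: l) = _
    simp only [inverse_pile_sans_modif_alt, List.head?, Option.getD_some]
    rw [pyRange_map_rev nk l hnkL]
    have hcnt : (((some (nk : Int) :: l).length : Int) - 1 - (nk : Int)).toNat = L - nk := by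
      simp [hL]
    rw [hcnt]
    simp [stk]
  rw [hB]
  unfold inverse_pile_sans_modif
  simp only []
  rw [hcre, h1, h2, h3]

-- ===== VERDICT (by name: the statement is the Claim_ definition above) =====
theorem inverse_pile_sans_modif_spec : Claim_equal_inverse_pile_sans_modif := by
  intro p _ hpre
  obtain ⟨hne, h0, hle⟩ := hpre
  match p with
  | [] => simp at hne
  | none :: l => simp at hne
  | some k :: l =>
    simp only [List.head?, Option.getD_some, List.length_cons] at h0 hle
    unfold Spec_inverse_pile_sans_modif
    obtain ⟨nk, rfl⟩ : ∃ nk : Nat, k = (nk : Int) := ⟨k.toNat, by omega⟩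
    have hst : some (nk : Int) :: l = stk nk l := rfl
    rw [hst, main_eq nk l (by push_cast at hle; omega)]
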